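-- pv_equiv track=rewrite | github.com/mireklzicar/gutenberg_download | gutenberg_download.py | pick_best_epub
-- ===== SOURCE A (Python) =====
-- from typing import Dict, List, Optional, Tuple
--
-- def pick_best_epub(formats: Dict[str, str]) -> Optional[str]:
--     """Return the best EPUB URL following the preference: noimages → plain → images."""
--     candidates = [url for mime, url in formats.items() if mime.startswith("application/epub")]
--     if not candidates:
--         return None
--
--     def score(u: str) -> int:
--         if ".noimages" in u:
--             return 0
--         if ".images" in u:
--             return 2
--         return 1  # plain EPUB (usually .epub3 or .epub)
--
--     candidates.sort(key=score)
--     return candidates[0]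
-- ===== SOURCE B (Python) =====
-- from typing import Dict, Optional
--
-- def pick_best_epub(formats: Dict[str, str]) -> Optional[str]:
--     """Single pass: remember the first EPUB URL seen in each preference tier."""
--     best_no = best_plain = best_img = None
--     for mime, url in formats.items():
--         if not mime.startswith("application/epub"):
--             continue
--         if ".noimages" in url:
--             if best_no is None:
--                 best_no = url
--         elif ".images" in url:
--             if best_img is None:
--                 best_img = url
--         else:
--             if best_plain is None:
--                 best_plain = url
--     if best_no is not None:
--         return best_no
--     if best_plain is not None:
--         return best_plain
--     return best_img
-- ===== Notes on version B (the rewrite author's own statement) =====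
-- stated objective: alternative
-- what changed: Replaces build-candidate-list + score function + stable sort + index with a single pass over the dict that keeps the first URL seen in each of the three preference tiers in three slots and returns the best non-empty slot.
import Mathlib
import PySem

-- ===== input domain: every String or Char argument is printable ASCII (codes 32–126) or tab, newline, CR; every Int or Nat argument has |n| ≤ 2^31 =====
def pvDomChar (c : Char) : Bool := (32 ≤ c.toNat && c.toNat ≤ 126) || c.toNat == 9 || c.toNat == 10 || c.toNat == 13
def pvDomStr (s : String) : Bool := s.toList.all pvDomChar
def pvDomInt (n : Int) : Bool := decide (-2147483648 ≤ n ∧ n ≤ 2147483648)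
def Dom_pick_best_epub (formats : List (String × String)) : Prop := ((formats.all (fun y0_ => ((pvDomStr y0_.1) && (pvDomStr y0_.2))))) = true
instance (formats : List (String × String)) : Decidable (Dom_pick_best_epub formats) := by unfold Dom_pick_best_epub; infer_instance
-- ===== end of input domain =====

-- B replaces A's candidate list + score/sort/index by one pass that keeps the first URL of each preference tier; return value only.
-- ===== PORT A =====
-- the nested 'score' helper of A
def pyScore (u : String) : Int :=
  if PySem.Str.isIn ".noimages" u then 0
  else if PySem.Str.isIn ".images" u then 2
  else 1

def pick_best_epub (formats : List (String × String)) : Option String :=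
  let candidates := (formats.filter (fun p => PySem.Str.startswith p.1 "application/epub")).map (fun p => p.2)
  if candidates = [] then none
  else PySem.List.pyGet? (PySem.List.sorted candidates pyScore false) 0

-- ===== PORT B =====
-- loop body of B: update the (noimages, plain, images) first-seen slots
def altStep (acc : Option String × Option String × Option String) (p : String × String) :
    Option String × Option String × Option String :=
  if PySem.Str.startswith p.1 "application/epub" then
    if PySem.Str.isIn ".noimages" p.2 then
      (if acc.1.isNone then (some p.2, acc.2.1, acc.2.2) else acc)
    else if PySem.Str.isIn ".images" p.2 then
      (if acc.2.2.isNone then (acc.1, acc.2.1, some p.2) else acc)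
    else
      (if acc.2.1.isNone then (acc.1, some p.2, acc.2.2) else acc)
  else acc

def pick_best_epub_alt (formats : List (String × String)) : Option String :=
  let r := formats.foldl altStep (none, none, none)
  match r.1 with
  | some u => some u
  | none =>
    match r.2.1 with
    | some u => some u
    | none => r.2.2

-- ===== PRECONDITION & SPEC =====
def Spec_pick_best_epub (formats : List (String × String)) (out : Option String) : Prop := out = pick_best_epub_alt formats
instance (formats : List (String × String)) (out : Option String) : Decidable (Spec_pick_best_epub formats out) := by unfold Spec_pick_best_epub; infer_instance

-- ===== CLAIM (what is proved, stated in full; the proofs are below) =====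
def Claim_equal_pick_best_epub : Prop := ∀ (formats : List (String × String)), Dom_pick_best_epub formats → Spec_pick_best_epub formats (pick_best_epub formats)

-- ===== LEMMAS AND PROOFS =====

-- first element of tier k among the EPUB candidates of fs
def tier (k : Int) (fs : List (String × String)) : Option String :=
  (((fs.filter (fun p => PySem.Str.startswith p.1 "application/epub")).map (fun p => p.2)).filter
      (fun u => pyScore u = k)).head?

theorem tier_cons (k : Int) (p : String × String) (t : List (String × String)) :
    tier k (p :: t) =
      if PySem.Str.startswith p.1 "application/epub" then
        (if pyScore p.2 = k then some p.2 else tier k t)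
      else tier k t := by
  unfold tier
  by_cases hs : PySem.Str.startswith p.1 "application/epub" = true
  · rw [List.filter_cons, if_pos hs, List.map_cons, List.filter_cons, if_pos hs]
    by_cases hk : pyScore p.2 = k
    · rw [if_pos (show (fun u => decide (pyScore u = k)) p.2 = true by simp [hk]),
        if_pos hk, List.head?_cons]
    · rw [if_neg (show ¬ (fun u => decide (pyScore u = k)) p.2 = true by simp [hk]), if_neg hk]
  · rw [List.filter_cons, if_neg hs, if_neg hs]

-- insertBy puts x right between a prefix it must not go before and a suffix it must
theorem insertBy_split {α : Type} (before : α → α → Bool) (x : α) (l m : List α)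
    (hl : ∀ y ∈ l, before x y = false) (hm : ∀ y ∈ m, before x y = true) :
    PySem.List.insertBy before x (l ++ m) = l ++ x :: m := by
  induction l with
  | nil =>
    cases m with
    | nil => rfl
    | cons y ys => simp [PySem.List.insertBy, hm y (by simp)]
  | cons a l ih =>
    have ha : before x a = false := hl a (by simp)
    have hstep : PySem.List.insertBy before x (a :: (l ++ m))
        = a :: PySem.List.insertBy before x (l ++ m) := by
      simp [PySem.List.insertBy, ha]
    simp only [List.cons_append, hstep]
    rw [ih (fun y hy => hl y (by simp [hy]))]

-- scores are exactly 0, 1 or 2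
theorem pyScore_cases (u : String) : pyScore u = 0 ∨ pyScore u = 1 ∨ pyScore u = 2 := by
  unfold pyScore; split_ifs <;> simp

-- the stable insertion sort by the three-valued score is the three tiers concatenated
theorem foldl_insert_tiered (cs : List String) :
    ∀ a0 a1 a2 : List String,
    (∀ y ∈ a0, pyScore y = 0) → (∀ y ∈ a1, pyScore y = 1) → (∀ y ∈ a2, pyScore y = 2) →
    cs.foldl (fun acc x => PySem.List.insertBy (fun a b => decide (pyScore a < pyScore b)) x acc)
        (a0 ++ a1 ++ a2)
      = (a0 ++ cs.filter (fun u => pyScore u = 0)) ++ (a1 ++ cs.filter (fun u => pyScore u = 1))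
        ++ (a2 ++ cs.filter (fun u => pyScore u = 2)) := by
  induction cs with
  | nil => intro a0 a1 a2 _ _ _; simp
  | cons x t ih =>
    intro a0 a1 a2 h0 h1 h2
    rcases pyScore_cases x with hx | hx | hx
    · have hins : PySem.List.insertBy (fun a b => decide (pyScore a < pyScore b)) x (a0 ++ a1 ++ a2)
          = a0 ++ x :: (a1 ++ a2) := by
        rw [List.append_assoc]
        apply insertBy_split
        · intro y hy; simp [h0 y hy, hx]
        · intro y hy
          rcases List.mem_append.1 hy with h | h
          · simp [h1 y h, hx]
          · simp [h2 y h, hx]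
      have H := ih (a0 ++ [x]) a1 a2
        (by intro y hy
            rcases List.mem_append.1 hy with h | h
            · exact h0 y h
            · simp at h; subst h; exact hx) h1 h2
      simp only [List.foldl_cons, hins]
      simp only [List.append_assoc, List.cons_append, List.nil_append] at H ⊢
      rw [H]
      simp [hx]
    · have hins : PySem.List.insertBy (fun a b => decide (pyScore a < pyScore b)) x (a0 ++ a1 ++ a2)
          = (a0 ++ a1) ++ x :: a2 := by
        apply insertBy_split
        · intro y hy
          rcases List.mem_append.1 hy with h | h
          · simp [h0 y h, hx]
          · simp [h1 y h, hx]
        · intro y hy; simp [h2 y hy, hx]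
      have H := ih a0 (a1 ++ [x]) a2 h0
        (by intro y hy
            rcases List.mem_append.1 hy with h | h
            · exact h1 y h
            · simp at h; subst h; exact hx) h2
      simp only [List.foldl_cons, hins]
      simp only [List.append_assoc, List.cons_append, List.nil_append] at H ⊢
      rw [H]
      simp [hx]
    · have hins : PySem.List.insertBy (fun a b => decide (pyScore a < pyScore b)) x (a0 ++ a1 ++ a2)
          = (a0 ++ a1 ++ a2) ++ [x] := by
        have := insertBy_split (fun a b => decide (pyScore a < pyScore b)) x (a0 ++ a1 ++ a2) []
          (by intro y hy
              rcases List.mem_append.1 hy with h | h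
              · rcases List.mem_append.1 h with h' | h'
                · simp [h0 y h', hx]
                · simp [h1 y h', hx]
              · simp [h2 y h, hx])
          (by intro y hy; simp at hy)
        simpa using this
      have H := ih a0 a1 (a2 ++ [x]) h0 h1
        (by intro y hy
            rcases List.mem_append.1 hy with h | h
            · exact h2 y h
            · simp at h; subst h; exact hx)
      simp only [List.foldl_cons, hins]
      simp only [List.append_assoc, List.cons_append, List.nil_append] at H ⊢
      rw [H]
      simp [hx]

theorem sorted_pyScore (cs : List String) :
    PySem.List.sorted cs pyScore false
      = cs.filter (fun u => pyScore u = 0) ++ cs.filter (fun u => pyScore u = 1)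
        ++ cs.filter (fun u => pyScore u = 2) := by
  rw [PySem.List.sorted_eq_foldl_insertBy]
  have := foldl_insert_tiered cs [] [] [] (by simp) (by simp) (by simp)
  simpa using this

-- B's fold computes the first URL of each tier
theorem foldl_altStep (fs : List (String × String)) :
    ∀ acc : Option String × Option String × Option String,
    fs.foldl altStep acc
      = (acc.1.or (tier 0 fs), acc.2.1.or (tier 1 fs), acc.2.2.or (tier 2 fs)) := by
  induction fs with
  | nil => intro acc; simp [tier]
  | cons p t ih =>
    intro acc
    obtain ⟨a, b, c⟩ := acc
    rw [List.foldl_cons, ih, tier_cons, tier_cons, tier_cons]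
    by_cases hs : PySem.Str.startswith p.1 "application/epub" = true
    · by_cases hn : PySem.Str.isIn ".noimages" p.2 = true
      · have hsc : pyScore p.2 = 0 := by unfold pyScore; exact if_pos hn
        simp at hs hn
        cases a <;> simp [altStep, hs, hn, hsc, Option.or]
      · by_cases hi : PySem.Str.isIn ".images" p.2 = true
        · have hsc : pyScore p.2 = 2 := by
            unfold pyScore; rw [if_neg hn, if_pos hi]
          simp at hs hn hi
          cases c <;> simp [altStep, hs, hn, hi, hsc, Option.or]
        · have hsc : pyScore p.2 = 1 := by
            unfold pyScore; rw [if_neg hn, if_neg hi]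
          simp at hs hn hi
          cases b <;> simp [altStep, hs, hn, hi, hsc, Option.or]
    · simp at hs
      simp [altStep, hs]

theorem pyGet?_zero (l : List String) (h : l ≠ []) : PySem.List.pyGet? l (0 : Int) = l.head? := by
  cases l with
  | nil => simp at h
  | cons x t => simp [PySem.List.pyGet?, PySem.List.pyIdx?]

-- ===== VERDICT (by name: the statement is the Claim_ definition above) =====
theorem pick_best_epub_spec : Claim_equal_pick_best_epub := by
  intro formats _
  unfold Spec_pick_best_epub pick_best_epub pick_best_epub_alt
  rw [foldl_altStep]
  simp only [Option.none_or]
  set cs := (formats.filter (fun p => PySem.Str.startswith p.1 "application/epub")).map (fun p => p.2) with hcs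
  have htier : ∀ k, tier k formats = (cs.filter (fun u => pyScore u = k)).head? := by
    intro k; rfl
  by_cases h : cs = []
  · simp [htier, h]
  · have hne : PySem.List.sorted cs pyScore false ≠ [] := by
      simp only [ne_eq, PySem.List.sorted_eq_nil_iff]; exact h
    rw [if_neg h, pyGet?_zero _ hne, sorted_pyScore]
    simp only [htier, List.head?_append]
    rcases h0 : (cs.filter (fun u => pyScore u = 0)).head? with _ | u0
    · rcases h1 : (cs.filter (fun u => pyScore u = 1)).head? with _ | u1
      · simp [Option.or]
      · simp [Option.or]
    · simp [Option.or]
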